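-- pv_equiv track=rewrite | github.com/peterhil/serpent | src/serpent/stats.py | pulse_repetition_intervals
-- ===== SOURCE A (Python) =====
-- from collections import Counter, OrderedDict, defaultdict
-- from collections.abc import Callable, Iterable, Sequence
--
-- def pulse_repetition_intervals(data: Iterable[str]):
-- 	"""Pulse repetition intervals for each symbol of data.
--
-- 	See: https://en.wikipedia.org/wiki/Pulse_width
-- 	"""
-- 	last = OrderedDict()
-- 	stat = defaultdict(list)
-- 	max_length = 0
--
-- 	for index, sym in enumerate(data):
-- 		previous = last.get(sym, 0)
-- 		last[sym] = index
-- 		run = index - previous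
-- 		max_length = max(run, max_length)
-- 		stat[sym].append(run)
--
-- 	return stat, max_length
-- ===== SOURCE B (Python) =====
-- from collections import defaultdict
--
-- def pulse_repetition_intervals(data):
-- 	"""Pulse repetition intervals for each symbol of data.
--
-- 	Two-pass version: index all occurrence positions per symbol, then take
-- 	consecutive differences (with a virtual predecessor at 0).
-- 	"""
-- 	positions = defaultdict(list)
-- 	for index, sym in enumerate(data):
-- 		positions[sym].append(index)
--
-- 	stat = defaultdict(list)
-- 	for sym, pos in positions.items():
-- 		stat[sym] = [p - q for p, q in zip(pos, [0] + pos)]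
--
-- 	max_length = 0
-- 	for intervals in stat.values():
-- 		for run in intervals:
-- 			max_length = max(max_length, run)
--
-- 	return stat, max_length
-- ===== Notes on version B (the rewrite author's own statement) =====
-- stated objective: alternative
-- what changed: Replaces A's single stateful pass (a last-seen dict updated element by element with a running max) by two passes: first group all occurrence indices per symbol into a position table, then compute each symbol's intervals as consecutive differences of its positions with a virtual predecessor at 0, taking the maximum over the grouped interval lists.
import Mathlib
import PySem

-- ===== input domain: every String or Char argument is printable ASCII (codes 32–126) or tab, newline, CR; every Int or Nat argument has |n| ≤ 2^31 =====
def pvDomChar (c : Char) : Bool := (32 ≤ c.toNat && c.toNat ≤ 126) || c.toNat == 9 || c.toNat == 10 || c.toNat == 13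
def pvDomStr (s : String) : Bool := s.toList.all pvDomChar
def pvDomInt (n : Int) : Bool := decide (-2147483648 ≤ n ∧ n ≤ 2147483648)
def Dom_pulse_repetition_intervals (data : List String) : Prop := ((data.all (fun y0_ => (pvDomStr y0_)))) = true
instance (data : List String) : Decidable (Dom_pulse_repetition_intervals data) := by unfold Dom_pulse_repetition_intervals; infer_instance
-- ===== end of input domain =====

-- B replaces A's single stateful pass (last-seen dict updated per element) by two passes:
-- first group all occurrence indices per symbol, then take consecutive differences with a
-- virtual predecessor at 0; objective: alternative decomposition, same cost.

-- ===== PORT A =====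
-- one step of A's loop: state = (last, stat, max_length), element = (index, sym)
def pviAStep (st : (PySem.Dict String Int) × (PySem.Dict String (List Int)) × Int)
    (p : Int × String) : (PySem.Dict String Int) × (PySem.Dict String (List Int)) × Int :=
  let previous := st.1.getD p.2 0
  let run := p.1 - previous
  (st.1.insert p.2 p.1, st.2.1.modify p.2 [] (fun l => l ++ [run]), max run st.2.2)

def pulse_repetition_intervals (data : List String) : (List (String × List Int)) × Int :=
  let st := (PySem.List.enumerate data 0).foldl pviAStep (PySem.Dict.empty, PySem.Dict.empty, 0)
  (st.2.1.items, st.2.2)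

-- ===== PORT B =====
-- [p - q for p, q in zip(pos, [0] + pos)]  (zip truncates at the shorter list)
def pviDiffs (pos : List Int) : List Int := List.zipWith (fun p q => p - q) pos (0 :: pos)

def pulse_repetition_intervals_alt (data : List String) : (List (String × List Int)) × Int :=
  let positions := (PySem.List.enumerate data 0).foldl
    (fun d (p : Int × String) => d.modify p.2 [] (fun l => l ++ [p.1])) PySem.Dict.empty
  let items := positions.items.map (fun q => (q.1, pviDiffs q.2))
  let maxl := items.foldl (fun m q => q.2.foldl max m) 0
  (items, maxl)

-- ===== PRECONDITION & SPEC =====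
def Spec_pulse_repetition_intervals (data : List String) (out : (List (String × List Int)) × Int) : Prop := out = pulse_repetition_intervals_alt data
instance (data : List String) (out : (List (String × List Int)) × Int) : Decidable (Spec_pulse_repetition_intervals data out) := by unfold Spec_pulse_repetition_intervals; infer_instance

-- ===== CLAIM (what is proved, stated in full; the proofs are below) =====
def Claim_equal_pulse_repetition_intervals : Prop := ∀ (data : List String), Dom_pulse_repetition_intervals data → Spec_pulse_repetition_intervals data (pulse_repetition_intervals data)

-- ===== LEMMAS AND PROOFS =====

-- proof-side abbreviations
def pviMap (L : List (String × List Int)) : List (String × List Int) :=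
  L.map (fun q => (q.1, pviDiffs q.2))
def pviNStep (m : Int) (q : String × List Int) : Int := (pviDiffs q.2).foldl max m

lemma pviDiffs_aux (i : Int) : ∀ (l : List Int) (c : Int),
    List.zipWith (fun p q => p - q) (l ++ [i]) (c :: (l ++ [i]))
      = List.zipWith (fun p q => p - q) l (c :: l) ++ [i - l.getLastD c] := by
  intro l
  induction l with
  | nil => intro c; simp
  | cons a l ih =>
    intro c
    simp only [List.cons_append, List.zipWith_cons_cons, ih a, List.getLastD_cons]

lemma pviDiffs_append (pos : List Int) (i : Int) :
    pviDiffs (pos ++ [i]) = pviDiffs pos ++ [i - pos.getLastD 0] := by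
  simpa [pviDiffs] using pviDiffs_aux i pos 0

lemma pviGet?_map (L : List (String × List Int)) (x : String) :
    (PySem.Dict.mk (pviMap L)).get? x = Option.map pviDiffs ((PySem.Dict.mk L).get? x) := by
  simp [PySem.Dict.get?, pviMap, List.find?_map, Function.comp_def, Option.map_map]

lemma pviGetD_map (L : List (String × List Int)) (x : String) :
    (PySem.Dict.mk (pviMap L)).getD x [] = pviDiffs ((PySem.Dict.mk L).getD x []) := by
  simp only [PySem.Dict.getD, pviGet?_map]
  cases (PySem.Dict.mk L).get? x with
  | none => simp [pviDiffs]
  | some v => simp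

lemma pviContains_map (L : List (String × List Int)) (x : String) :
    (PySem.Dict.mk (pviMap L)).contains x = (PySem.Dict.mk L).contains x := by
  simp [PySem.Dict.contains, pviMap, List.any_map, Function.comp_def]

-- (A) the stat dict is always the diffs-image of the positions dict
lemma pviModify_map (P : PySem.Dict String (List Int)) (x : String) (i : Int) :
    (PySem.Dict.mk (pviMap P.items)).modify x [] (fun l => l ++ [i - (P.getD x []).getLastD 0])
      = PySem.Dict.mk (pviMap ((P.modify x [] (fun l => l ++ [i])).items)) := by
  have hc := pviContains_map P.items x
  by_cases h : P.contains x = true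
  · simp only [PySem.Dict.modify, PySem.Dict.insert, hc, h, if_pos, pviGetD_map]
    simp only [pviMap, List.map_map]
    congr 1
    apply List.map_congr_left
    intro p _
    by_cases hp : p.1 = x
    · have hgetD : ({ items := P.items } : PySem.Dict String (List Int)).getD x [] = P.getD x [] := rfl
      simp [hp, hgetD, pviDiffs_append, List.getLastD_eq_getLast?]
    · simp [hp]
  · have h' : P.contains x = false := by simpa using h
    simp only [PySem.Dict.modify, PySem.Dict.insert, hc, h', Bool.false_eq_true, if_neg,
      pviGetD_map, PySem.Dict.getD_of_not_contains _ _ h', not_false_iff]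
    simp [pviMap, pviDiffs]

lemma pviFoldlMax_max (l : List Int) : ∀ (c m : Int),
    l.foldl max (max c m) = max c (l.foldl max m) := by
  induction l with
  | nil => intro c m; simp
  | cons a l ih =>
    intro c m
    simp only [List.foldl_cons]
    rw [show max (max c m) a = max c (max m a) by omega, ih]

lemma pviFoldlN_max (L : List (String × List Int)) : ∀ (c m : Int),
    L.foldl pviNStep (max c m) = max c (L.foldl pviNStep m) := by
  induction L with
  | nil => intro c m; simp
  | cons q L ih =>
    intro c m
    simp only [List.foldl_cons, pviNStep, pviFoldlMax_max]
    rw [ih]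

lemma pviDecomp (x : String) : ∀ (L : List (String × List Int)),
    (L.map (·.1)).Nodup → L.any (fun p => p.1 == x) = true →
    ∃ L₁ pos₀ L₂, L = L₁ ++ (x, pos₀) :: L₂ ∧ (∀ p ∈ L₁, (p.1 == x) = false) ∧
      (∀ p ∈ L₂, (p.1 == x) = false) := by
  intro L
  induction L with
  | nil => intro _ h; simp at h
  | cons p L ih =>
    intro hnd hany
    by_cases hp : p.1 = x
    · refine ⟨[], p.2, L, ?_, by simp, ?_⟩
      · simp [← hp]
      · intro q hq
        have : p.1 ∉ L.map (·.1) := (List.nodup_cons.mp hnd).1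
        have hqx : q.1 ∈ L.map (·.1) := List.mem_map_of_mem hq
        simp only [beq_eq_false_iff_ne, ne_eq]
        intro hEq; exact this (by rw [hp, ← hEq]; exact hqx)
    · have hany' : L.any (fun p => p.1 == x) = true := by
        simp only [List.any_cons] at hany
        rcases Bool.or_eq_true_iff.mp hany with h | h
        · exact absurd (by simpa using h) hp
        · exact h
      obtain ⟨L₁, pos₀, L₂, hL, h₁, h₂⟩ := ih (List.nodup_cons.mp hnd).2 hany'
      exact ⟨p :: L₁, pos₀, L₂, by simp [hL], by
        intro q hq
        rcases List.mem_cons.mp hq with rfl | hq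
        · simpa using hp
        · exact h₁ q hq, h₂⟩

-- (B) one modify step changes the grouped maximum exactly as A's running max does
lemma pviNmax_modify (P : PySem.Dict String (List Int)) (x : String) (i : Int)
    (hnd : P.keys.Nodup) :
    ((P.modify x [] (fun l => l ++ [i])).items).foldl pviNStep 0
      = max (i - (P.getD x []).getLastD 0) (P.items.foldl pviNStep 0) := by
  by_cases h : P.contains x = true
  · obtain ⟨L₁, pos₀, L₂, hL, h₁, h₂⟩ := pviDecomp x P.items hnd (by
      simpa [PySem.Dict.contains] using h)
    have hget : P.getD x [] = pos₀ := by
      have hfind₁ : L₁.find? (fun p => p.1 == x) = none :=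
        List.find?_eq_none.mpr (by intro q hq; simp [h₁ q hq])
      simp [PySem.Dict.getD, PySem.Dict.get?, hL, List.find?_append, hfind₁]
    have hmap₁ : L₁.map (fun p => if (p.1 == x) = true then (x, pos₀ ++ [i]) else p) = L₁ := by
      conv_rhs => rw [← List.map_id L₁]
      exact List.map_congr_left (fun q hq => by simp [h₁ q hq])
    have hmap₂ : L₂.map (fun p => if (p.1 == x) = true then (x, pos₀ ++ [i]) else p) = L₂ := by
      conv_rhs => rw [← List.map_id L₂]
      exact List.map_congr_left (fun q hq => by simp [h₂ q hq])
    have hitems : (P.modify x [] (fun l => l ++ [i])).items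
        = L₁ ++ (x, pos₀ ++ [i]) :: L₂ := by
      simp only [PySem.Dict.modify]
      rw [PySem.Dict.items_insert_of_contains _ _ h, hget, hL, List.map_append, List.map_cons,
        hmap₁, hmap₂]
      simp
    rw [hitems, hget, hL]
    simp only [List.foldl_append, List.foldl_cons]
    have hstep : ∀ m : Int, pviNStep m (x, pos₀ ++ [i])
        = max (i - pos₀.getLastD 0) (pviNStep m (x, pos₀)) := by
      intro m
      simp only [pviNStep, pviDiffs_append, List.foldl_append, List.foldl_cons, List.foldl_nil]
      omega
    rw [hstep, pviFoldlN_max]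
  · have h' : P.contains x = false := by simpa using h
    have hitems : (P.modify x [] (fun l => l ++ [i])).items = P.items ++ [(x, [i])] := by
      simp [PySem.Dict.modify, PySem.Dict.insert, h', PySem.Dict.getD_of_not_contains _ _ h']
    rw [hitems, PySem.Dict.getD_of_not_contains _ _ h']
    simp only [List.foldl_append, List.foldl_cons, List.foldl_nil, pviNStep]
    have : pviDiffs [i] = [i] := by simp [pviDiffs]
    rw [this]
    simp only [List.foldl_cons, List.foldl_nil, List.getLastD]
    omega

-- (C) the last-seen dict always holds the last recorded position (or 0)
lemma pviLast_step (P : PySem.Dict String (List Int)) (last : PySem.Dict String Int)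
    (h1 : ∀ s, last.getD s 0 = (P.getD s []).getLastD 0) (x : String) (i : Int) :
    ∀ s, (last.insert x i).getD s 0
      = ((P.modify x [] (fun l => l ++ [i])).getD s []).getLastD 0 := by
  intro s
  by_cases h : s = x
  · subst h; simp
  · simp [PySem.Dict.getD_insert, PySem.Dict.getD_modify, h, h1 s]

lemma pviNodup_step (P : PySem.Dict String (List Int)) (hnd : P.keys.Nodup) (x : String)
    (i : Int) : (P.modify x [] (fun l => l ++ [i])).keys.Nodup := by
  simp only [PySem.Dict.modify]
  exact PySem.Dict.nodup_keys_insert _ _ _ hnd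

-- main loop invariant: A's (stat, max) state is the diffs-image of B's positions dict
lemma pviMain : ∀ (l : List String) (i : Int) (last : PySem.Dict String Int)
    (P : PySem.Dict String (List Int)),
    (∀ s, last.getD s 0 = (P.getD s []).getLastD 0) → P.keys.Nodup →
    ((PySem.List.enumerate l i).foldl pviAStep
        (last, PySem.Dict.mk (pviMap P.items), P.items.foldl pviNStep 0)).2
      = (PySem.Dict.mk (pviMap (((PySem.List.enumerate l i).foldl
            (fun d (p : Int × String) => d.modify p.2 [] (fun l => l ++ [p.1])) P).items)),
         (((PySem.List.enumerate l i).foldl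
            (fun d (p : Int × String) => d.modify p.2 [] (fun l => l ++ [p.1])) P).items).foldl
           pviNStep 0) := by
  intro l
  induction l with
  | nil => intro i last P _ _; simp [PySem.List.enumerate_nil]
  | cons x xs ih =>
    intro i last P h1 hnd
    rw [PySem.List.enumerate_cons]
    simp only [List.foldl_cons]
    have hstep : pviAStep (last, PySem.Dict.mk (pviMap P.items), P.items.foldl pviNStep 0) (i, x)
        = (last.insert x i,
           PySem.Dict.mk (pviMap ((P.modify x [] (fun l => l ++ [i])).items)),
           ((P.modify x [] (fun l => l ++ [i])).items).foldl pviNStep 0) := by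
      simp only [pviAStep, h1 x]
      rw [pviModify_map, pviNmax_modify P x i hnd]
    rw [hstep]
    exact ih (i + 1) (last.insert x i) (P.modify x [] (fun l => l ++ [i]))
      (pviLast_step P last h1 x i) (pviNodup_step P hnd x i)

-- ===== VERDICT (by name: the statement is the Claim_ definition above) =====
theorem pulse_repetition_intervals_spec : Claim_equal_pulse_repetition_intervals := by
  intro data _
  unfold Spec_pulse_repetition_intervals
  have h := pviMain data 0 PySem.Dict.empty PySem.Dict.empty
    (by intro s; simp [PySem.Dict.empty]; rfl)
    PySem.Dict.nodup_keys_empty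
  simp only [pulse_repetition_intervals, pulse_repetition_intervals_alt]
  have hempty : PySem.Dict.mk (pviMap (PySem.Dict.empty (κ := String) (ν := List Int)).items)
      = PySem.Dict.empty := rfl
  have hempty2 : ((PySem.Dict.empty (κ := String) (ν := List Int)).items).foldl pviNStep 0 = 0 := rfl
  rw [hempty, hempty2] at h
  rw [h]
  simp only [pviMap, List.foldl_map]
  rfl
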